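-- pv_equiv track=rewrite | github.com/francky91/TVC | utils.py | construire_bracket
-- ===== SOURCE A (Python) =====
-- def construire_bracket(n, start=1):
--     def fusion_bracket(top, bottom):
--         """
--         'top' et 'bottom' sont deux listes de même taille.
--         On les combine en suivant le « pattern » qui
--         reproduit l’ordre 1,8,5,4,3,6,7,2 pour n=8, etc.
--         """
--         m = len(top)
--         result = []
--
--         # On suppose m est pair (ce sera le cas si n = 2^k >= 4)
--         for i in range(0, m, 2):
--             # On "tresse" 4 éléments à la fois :
--             #  top[i], bottom[i+1], bottom[i], top[i+1]
--             result.append(top[i])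
--             result.append(bottom[i+1])
--             result.append(bottom[i])
--             result.append(top[i+1])
--         return result
--
--     # ---------------------------------------------
--     # 2) Fonction récursive principale
--     # ---------------------------------------------
--     def construire_ordre_bracket(n, start=1):
--         """
--         Construit l'ordre exact désiré pour un tableau de n joueurs
--         (n = 2^k) numérotés de 'start' à 'start+n-1'.
--
--         Exemple : construire_ordre_bracket(8, 1) => [1, 8, 5, 4, 3, 6, 7, 2]
--         """
--         # Cas de base : quand n=2, on retourne [start, start+1]
--         if n == 2:
--             return [start, start+1]
--
--         # On construit récursivement la "moitié du haut" et la "moitié du bas"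
--         half = n // 2
--         top = construire_ordre_bracket(half, start)          # ex: bracket(4) si n=8
--         bottom = construire_ordre_bracket(half, start+half)  # ex: bracket(4) pour seeds 5..8
--
--         # On fusionne selon le pattern voulu
--         return fusion_bracket(top, bottom)
--
--     # ---------------------------------------------
--     # 3) Petite fonction utilitaire pour sortir
--     #    directement une liste de dict {seed: ""}
--     # ---------------------------------------------
--
--     ordre = construire_ordre_bracket(n, start)
--     return [{s: ""} for s in ordre]
-- ===== SOURCE B (Python) =====
-- def construire_bracket(n, start=1):
--     # Alternative: no recursion and no per-level merge passes.  Precompute the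
--     # chain of halvings of n (valid bracket sizes halve down to exactly 2);
--     # each seed is then computed directly from its index: bit j of i (above
--     # the lowest bit b0, XORed with b0) selects whether the j-th halving
--     # offset is added.
--     halves = []
--     v = n
--     while v > 2:
--         v //= 2
--         halves.append(v)
--     if v != 2:
--         raise ValueError("n must halve down to exactly 2")
--     size = 2 ** (len(halves) + 1)
--     out = []
--     for i in range(size):
--         b0 = i % 2
--         s = b0
--         x = i // 2
--         for v in halves:
--             s += (b0 ^ (x % 2)) * v
--             x //= 2
--         out.append({start + s: ""})
--     return out
-- ===== Notes on version B (the rewrite author's own statement) =====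
-- stated objective: alternative
-- what changed: Replaces the recursive halve-and-braid construction (recursion + fusion pass per level) with a single loop computing each seed directly from its index via bit-reversal of i>>1.
import Mathlib
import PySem

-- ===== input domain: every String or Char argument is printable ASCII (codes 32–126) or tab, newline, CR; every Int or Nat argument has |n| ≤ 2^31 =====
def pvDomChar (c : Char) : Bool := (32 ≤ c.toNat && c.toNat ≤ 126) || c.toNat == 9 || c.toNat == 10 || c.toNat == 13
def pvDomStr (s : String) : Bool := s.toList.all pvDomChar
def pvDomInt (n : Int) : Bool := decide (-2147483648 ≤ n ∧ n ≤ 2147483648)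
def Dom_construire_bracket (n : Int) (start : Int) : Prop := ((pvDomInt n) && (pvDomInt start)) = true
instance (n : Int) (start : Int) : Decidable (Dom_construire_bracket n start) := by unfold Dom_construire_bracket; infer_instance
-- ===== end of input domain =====

-- B replaces A's recursive halve-and-braid construction by a single pass that
-- computes each seed directly from its index (XOR-selected halving offsets):
-- an alternative algorithm of similar cost.


-- ===== PORT A =====
-- fusion_bracket: the indices it reads are always in range in every call A's
-- recursion makes on an input where A terminates, so pyGetD with default 0 is
-- exact there.
def fusion_bracketA (top : List Int) (bottom : List Int) : List Int :=
  (PySem.List.pyRange 0 (top.length : Int) 2).foldl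
    (fun result i =>
      (((result ++ [PySem.List.pyGetD top i 0])
          ++ [PySem.List.pyGetD bottom (i + 1) 0])
          ++ [PySem.List.pyGetD bottom i 0])
          ++ [PySem.List.pyGetD top (i + 1) 0])
    []

-- construire_ordre_bracket; fuel bounds the recursion depth: with fuel 64 it
-- is never exhausted on Pre_ (at most 32 halvings for |n| ≤ 2^31); where
-- Python's recursion never reaches the base case (RecursionError) the input
-- is outside Pre_.
def construire_ordre_bracketA : Nat → Int → Int → List Int
  | 0, _, _ => []
  | fuel + 1, n, start =>
    if n = 2 then [start, start + 1]
    else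
      let half := PySem.Int.floordiv n 2
      fusion_bracketA (construire_ordre_bracketA fuel half start)
        (construire_ordre_bracketA fuel half (start + half))

def construire_bracket (n : Int) (start : Int) : List (List (Int × String)) :=
  (construire_ordre_bracketA 64 n start).map (fun s => [(s, "")])

-- ===== PORT B =====
-- the 'while v > 2: v //= 2; halves.append(v)' loop of Source B; fuel 64 is never
-- exhausted for |n| ≤ 2^31 (the value at least halves each iteration)
-- state (halves so far, current v); returns (final halves, final v)
def halvesB : Nat → Int → (List Int × Int)
  | 0, v => ([], v)
  | fuel + 1, v =>
    if v > 2 then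
      let rest := halvesB fuel (PySem.Int.floordiv v 2)
      (PySem.Int.floordiv v 2 :: rest.1, rest.2)
    else ([], v)

def construire_bracket_alt (n : Int) (start : Int) : List (List (Int × String)) :=
  let hv := halvesB 64 n
  if hv.2 ≠ 2 then []  -- Source B raises ValueError here; such inputs are outside Pre_
  else
  let halves := hv.1
  let size : Nat := 2 ^ (halves.length + 1)
  (List.range size).map (fun i =>
    let b0 := i % 2
    let p := halves.foldl
      (fun (st : Int × Nat) v => (st.1 + ((b0 ^^^ st.2 % 2 : Nat) : Int) * v, st.2 / 2))
      (((b0 : Nat) : Int), i / 2)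
    [(start + p.1, "")])

-- ===== PRECONDITION & SPEC =====
-- Pre_ excludes exactly the inputs where A's recursion never reaches its base
-- case n == 2 and Python raises RecursionError: A returns exactly when
-- repeated floor-halving of n hits 2, i.e. 2^(k+1) ≤ n < 3*2^k for some k
-- (k < 32 covers every such n inside the |n| ≤ 2^31 domain).
def Pre_construire_bracket (n : Int) (start : Int) : Prop :=
  ∃ k : Nat, k < 32 ∧ (2 : Int) ^ (k + 1) ≤ n ∧ n < 3 * 2 ^ k
instance (n : Int) (start : Int) : Decidable (Pre_construire_bracket n start) := by
  unfold Pre_construire_bracket; infer_instance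

def pvWitness_construire_bracket : Int × Int := (4, 1)

def Spec_construire_bracket (n : Int) (start : Int) (out : List (List (Int × String))) : Prop := out = construire_bracket_alt n start
instance (n : Int) (start : Int) (out : List (List (Int × String))) : Decidable (Spec_construire_bracket n start out) := by unfold Spec_construire_bracket; infer_instance

-- ===== CLAIM (what is proved, stated in full; the proofs are below) =====
def Claim_equal_construire_bracket : Prop := ∀ (n : Int) (start : Int), Dom_construire_bracket n start → Pre_construire_bracket n start → Spec_construire_bracket n start (construire_bracket n start)

-- ===== LEMMAS AND PROOFS =====

-- the halving chain of n reaches exactly 2 after L steps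
def chainOK : Nat → Int → Prop
  | 0, n => n = 2
  | L + 1, n => n ≠ 2 ∧ chainOK L (PySem.Int.floordiv n 2)

-- the seed offset at index i of a bracket built from n by L halvings
def gG : Nat → Int → Nat → Int
  | 0, _, i => (i : Int)
  | L + 1, n, i =>
      (if (i % 2) ^^^ (i / 2 % 2) = 1 then PySem.Int.floordiv n 2 else 0)
        + gG L (PySem.Int.floordiv n 2) (2 * (i / 4) + i % 2)

lemma chainOK_two_le : ∀ (L : Nat) (n : Int), chainOK L n → 2 ≤ n := by
  intro L
  induction L with
  | zero => intro n h; rw [show chainOK 0 n = (n = 2) from rfl] at h; omega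
  | succ L ih =>
    intro n h
    obtain ⟨-, h2⟩ := h
    have := ih _ h2
    rw [PySem.Int.le_floordiv_iff_mul_le (by norm_num : (0:Int) < 2)] at this
    omega

lemma gG_four0 (L : Nat) (n : Int) (j : Nat) :
    gG (L + 1) n (4 * j) = gG L (PySem.Int.floordiv n 2) (2 * j) := by
  have e1 : 4 * j % 2 = 0 := by omega
  have e2 : 4 * j / 2 % 2 = 0 := by omega
  have e3 : 4 * j / 4 = j := by omega
  simp only [gG, e1, e2, e3]
  norm_num

lemma gG_four1 (L : Nat) (n : Int) (j : Nat) :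
    gG (L + 1) n (4 * j + 1) = PySem.Int.floordiv n 2 + gG L (PySem.Int.floordiv n 2) (2 * j + 1) := by
  have e1 : (4 * j + 1) % 2 = 1 := by omega
  have e2 : (4 * j + 1) / 2 % 2 = 0 := by omega
  have e3 : (4 * j + 1) / 4 = j := by omega
  simp only [gG, e1, e2, e3]
  norm_num

lemma gG_four2 (L : Nat) (n : Int) (j : Nat) :
    gG (L + 1) n (4 * j + 2) = PySem.Int.floordiv n 2 + gG L (PySem.Int.floordiv n 2) (2 * j) := by
  have e1 : (4 * j + 2) % 2 = 0 := by omega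
  have e2 : (4 * j + 2) / 2 % 2 = 1 := by omega
  have e3 : (4 * j + 2) / 4 = j := by omega
  simp only [gG, e1, e2, e3]
  norm_num

lemma gG_four3 (L : Nat) (n : Int) (j : Nat) :
    gG (L + 1) n (4 * j + 3) = gG L (PySem.Int.floordiv n 2) (2 * j + 1) := by
  have e1 : (4 * j + 3) % 2 = 1 := by omega
  have e2 : (4 * j + 3) / 2 % 2 = 1 := by omega
  have e3 : (4 * j + 3) / 4 = j := by omega
  simp only [gG, e1, e2, e3]
  norm_num

lemma pyRange_step2 (t : Nat) :
    PySem.List.pyRange 0 ((2 * t : Nat) : Int) 2 = (List.range t).map (fun j => ((2 * j : Nat) : Int)) := by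
  rw [PySem.List.pyRange_of_pos _ _ (by norm_num : (0:Int) < 2)]
  have hcount : (if (0 : Int) < ((2 * t : Nat) : Int)
      then ((((2 * t : Nat) : Int) - 0 + 2 - 1) / 2).toNat else 0) = t := by
    split_ifs with h
    · have e : (((2 * t : Nat) : Int) - 0 + 2 - 1) = ((2 * t + 1 : Nat) : Int) := by
        push_cast; ring
      rw [e]
      omega
    · have : t = 0 := by omega
      omega
  rw [hcount]
  apply List.map_congr_left
  intro j _
  push_cast
  ring

lemma fusionA_eq (t : Nat) (f h : Nat → Int) :
    fusion_bracketA ((List.range (2 * t)).map f) ((List.range (2 * t)).map h)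
      = (List.range t).flatMap
          (fun j => [f (2 * j), h (2 * j + 1), h (2 * j), f (2 * j + 1)]) := by
  unfold fusion_bracketA
  simp only [List.length_map, List.length_range]
  rw [pyRange_step2, List.foldl_map]
  have hb : ∀ (acc : List Int) (j : Nat),
      (((acc ++ [PySem.List.pyGetD ((List.range (2 * t)).map f) ((2 * j : Nat) : Int) 0])
          ++ [PySem.List.pyGetD ((List.range (2 * t)).map h) (((2 * j : Nat) : Int) + 1) 0])
          ++ [PySem.List.pyGetD ((List.range (2 * t)).map h) ((2 * j : Nat) : Int) 0])
          ++ [PySem.List.pyGetD ((List.range (2 * t)).map f) (((2 * j : Nat) : Int) + 1) 0]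
      = acc ++ ([PySem.List.pyGetD ((List.range (2 * t)).map f) ((2 * j : Nat) : Int) 0]
          ++ [PySem.List.pyGetD ((List.range (2 * t)).map h) (((2 * j : Nat) : Int) + 1) 0]
          ++ [PySem.List.pyGetD ((List.range (2 * t)).map h) ((2 * j : Nat) : Int) 0]
          ++ [PySem.List.pyGetD ((List.range (2 * t)).map f) (((2 * j : Nat) : Int) + 1) 0]) := by
    intro acc j; simp [List.append_assoc]
  simp only [hb]
  rw [PySem.List.foldl_append_eq_flatMap
      (g := fun j => [PySem.List.pyGetD ((List.range (2 * t)).map f) ((2 * j : Nat) : Int) 0]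
          ++ [PySem.List.pyGetD ((List.range (2 * t)).map h) (((2 * j : Nat) : Int) + 1) 0]
          ++ [PySem.List.pyGetD ((List.range (2 * t)).map h) ((2 * j : Nat) : Int) 0]
          ++ [PySem.List.pyGetD ((List.range (2 * t)).map f) (((2 * j : Nat) : Int) + 1) 0])]
  rw [List.nil_append, List.flatMap_def, List.flatMap_def]
  congr 1
  apply List.map_congr_left
  intro j hj
  rw [List.mem_range] at hj
  have hget : ∀ (g : Nat → Int) (m : Nat), m < 2 * t →
      PySem.List.pyGetD ((List.range (2 * t)).map g) ((m : Nat) : Int) 0 = g m := by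
    intro g m hm
    rw [PySem.List.pyGetD_natCast]
    simp [List.getD, hm]
  have c1 : (((2 * j : Nat) : Int) + 1) = ((2 * j + 1 : Nat) : Int) := by push_cast; ring
  rw [c1, hget f (2 * j) (by omega), hget h (2 * j + 1) (by omega),
      hget h (2 * j) (by omega), hget f (2 * j + 1) (by omega)]
  simp

lemma range_four (t : Nat) :
    List.range (4 * t) = (List.range t).flatMap (fun j => [4 * j, 4 * j + 1, 4 * j + 2, 4 * j + 3]) := by
  induction t with
  | zero => simp
  | succ t ih =>
    have e : 4 * (t + 1) = 4 * t + 4 := by ring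
    rw [e, List.range_add, ih, show List.range (t + 1) = List.range t ++ [t] from List.range_succ,
        List.flatMap_append]
    congr 1

lemma cob_eq : ∀ (L fuel : Nat) (n start : Int), L + 1 ≤ fuel → chainOK L n →
    construire_ordre_bracketA fuel n start
      = (List.range (2 ^ (L + 1))).map (fun i => start + gG L n i) := by
  intro L
  induction L with
  | zero =>
    intro fuel n start hf hch
    have hn : n = 2 := hch
    obtain ⟨f, rfl⟩ : ∃ f, fuel = f + 1 := ⟨fuel - 1, by omega⟩
    subst hn
    simp only [construire_ordre_bracketA]
    norm_num [List.range_succ, gG]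
  | succ L ih =>
    intro fuel n start hf hch
    obtain ⟨hne, hch'⟩ := hch
    obtain ⟨f, rfl⟩ : ∃ f, fuel = f + 1 := ⟨fuel - 1, by omega⟩
    simp only [construire_ordre_bracketA, if_neg hne]
    rw [ih f _ start (by omega) hch', ih f _ (start + PySem.Int.floordiv n 2) (by omega) hch']
    have e1 : (2 ^ (L + 1) : Nat) = 2 * 2 ^ L := by ring
    rw [e1, fusionA_eq (2 ^ L) _ _]
    have e2 : (2 ^ (L + 1 + 1) : Nat) = 4 * 2 ^ L := by ring
    rw [e2, range_four, List.map_flatMap]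
    congr 1
    funext j
    simp only [List.map_cons, List.map_nil]
    rw [gG_four0, gG_four1, gG_four2, gG_four3]
    simp [add_assoc]

lemma halvesB_two (fuel : Nat) : halvesB fuel 2 = ([], 2) := by
  cases fuel with
  | zero => rfl
  | succ f => simp [halvesB]

lemma halves_len : ∀ (L fuel : Nat) (n : Int), L ≤ fuel → chainOK L n →
    (halvesB fuel n).1.length = L ∧ (halvesB fuel n).2 = 2 := by
  intro L
  induction L with
  | zero =>
    intro fuel n _ hch
    have hn : n = 2 := hch
    subst hn
    rw [halvesB_two]
    exact ⟨rfl, rfl⟩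
  | succ L ih =>
    intro fuel n hf hch
    obtain ⟨hne, hch'⟩ := hch
    have h2 : 2 ≤ PySem.Int.floordiv n 2 := chainOK_two_le L _ hch'
    have hgt : n > 2 := by
      rw [PySem.Int.le_floordiv_iff_mul_le (by norm_num : (0:Int) < 2)] at h2
      omega
    obtain ⟨f, rfl⟩ : ∃ f, fuel = f + 1 := ⟨fuel - 1, by omega⟩
    obtain ⟨ih1, ih2⟩ := ih f _ (by omega : L ≤ f) hch'
    simp only [halvesB, if_pos hgt, List.length_cons]
    exact ⟨by rw [ih1], ih2⟩

lemma fold_eq : ∀ (L fuel : Nat) (n : Int), L ≤ fuel → chainOK L n →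
    ∀ (i : Nat), i < 2 ^ (L + 1) → ∀ (s0 : Int),
    ((halvesB fuel n).1.foldl
        (fun (st : Int × Nat) v => (st.1 + ((i % 2 ^^^ st.2 % 2 : Nat) : Int) * v, st.2 / 2))
        (s0, i / 2)).1
      = s0 + gG L n i - ((i % 2 : Nat) : Int) := by
  intro L
  induction L with
  | zero =>
    intro fuel n _ hch i hi s0
    have hn : n = 2 := hch
    subst hn
    rw [halvesB_two]
    have e : i % 2 = i := by omega
    simp only [List.foldl_nil, gG]
    rw [e]
    ring
  | succ L ih =>
    intro fuel n hf hch i hi s0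
    obtain ⟨hne, hch'⟩ := hch
    have h2 : 2 ≤ PySem.Int.floordiv n 2 := chainOK_two_le L _ hch'
    have hgt : n > 2 := by
      rw [PySem.Int.le_floordiv_iff_mul_le (by norm_num : (0:Int) < 2)] at h2
      omega
    obtain ⟨f, rfl⟩ : ∃ f, fuel = f + 1 := ⟨fuel - 1, by omega⟩
    simp only [halvesB, if_pos hgt, List.foldl_cons]
    have ed : i / 2 / 2 = (2 * (i / 4) + i % 2) / 2 := by omega
    have em : (2 * (i / 4) + i % 2) % 2 = i % 2 := by omega
    have hi' : 2 * (i / 4) + i % 2 < 2 ^ (L + 1) := by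
      have hp1 : (2 ^ (L + 1 + 1) : Nat) = 4 * 2 ^ L := by ring
      have hp2 : (2 ^ (L + 1) : Nat) = 2 * 2 ^ L := by ring
      omega
    have key := ih f (PySem.Int.floordiv n 2) (by omega) hch' (2 * (i / 4) + i % 2) hi'
      (s0 + ((i % 2 ^^^ i / 2 % 2 : Nat) : Int) * PySem.Int.floordiv n 2)
    rw [em] at key
    rw [ed, key]
    simp only [gG]
    rcases Nat.mod_two_eq_zero_or_one i with h0 | h0 <;>
      rcases Nat.mod_two_eq_zero_or_one (i / 2) with h1 | h1 <;>
      simp [h0, h1] <;> ring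

lemma alt_eq (L : Nat) (n start : Int) (hL : L ≤ 64) (hch : chainOK L n) :
    construire_bracket_alt n start
      = (List.range (2 ^ (L + 1))).map (fun i => [(start + gG L n i, "")]) := by
  obtain ⟨hlen, hfin⟩ := halves_len L 64 n hL hch
  simp only [construire_bracket_alt]
  rw [if_neg (by rw [hfin]; exact fun h => h rfl), hlen]
  apply List.map_congr_left
  intro i hi
  rw [List.mem_range] at hi
  rw [fold_eq L 64 n hL hch i hi (((i % 2 : Nat) : Int))]
  congr 2
  ring

lemma pre_chain : ∀ (k : Nat) (n : Int), (2 : Int) ^ (k + 1) ≤ n → n < 3 * 2 ^ k → chainOK k n := by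
  intro k
  induction k with
  | zero =>
    intro n h1 h2
    show n = 2
    norm_num at h1 h2
    omega
  | succ k ih =>
    intro n h1 h2
    have hc1 : ((2 : Int)) ^ (k + 2) = ((2 ^ (k + 2) : Nat) : Int) := by push_cast; ring
    have h4n : (2 ^ 2 : Nat) ≤ 2 ^ (k + 2) := Nat.pow_le_pow_right (by norm_num) (by omega)
    have hne : n ≠ 2 := by
      rw [hc1] at h1
      have : ((2 ^ 2 : Nat) : Int) ≤ ((2 ^ (k + 2) : Nat) : Int) := by exact_mod_cast h4n
      norm_num at this
      omega
    refine ⟨hne, ih _ ?_ ?_⟩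
    · rw [PySem.Int.le_floordiv_iff_mul_le (by norm_num : (0:Int) < 2)]
      calc (2 : Int) ^ (k + 1) * 2 = 2 ^ (k + 2) := by ring
      _ ≤ n := h1
    · rw [PySem.Int.floordiv_lt_iff_lt_mul (by norm_num : (0:Int) < 2)]
      calc n < 3 * 2 ^ (k + 1) := h2
      _ = 3 * 2 ^ k * 2 := by ring

-- ===== VERDICT (by name: the statement is the Claim_ definition above) =====
theorem construire_bracket_spec : Claim_equal_construire_bracket := by
  intro n start hDom hPre
  obtain ⟨k, hk, h1, h2⟩ := hPre
  have hch := pre_chain k n h1 h2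
  show construire_bracket n start = construire_bracket_alt n start
  unfold construire_bracket
  rw [cob_eq k 64 n start (by omega) hch, alt_eq k n start (by omega) hch, List.map_map]
  rfl
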